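-- pv_equiv track=rewrite | github.com/moono/stylegan2-tf-2.x | stylegan2/utils.py | compute_training_image_counts
-- ===== SOURCE A (Python) =====
-- def compute_training_image_counts(train_start_res, resolutions, do_transition_res,
--                                   train_trans_images_per_res, train_fixed_images_per_res, train_total_n_images):
--     cur_image_count = 0
--     train_n_images = dict()
--     for res, do_transition in do_transition_res.items():
--         if res < train_start_res:
--             n_trans = 0
--             n_fixed = 0
--         else:
--             if res != resolutions[-1]:
--                 n_trans = train_trans_images_per_res if do_transition else 0
--                 n_fixed = train_fixed_images_per_res
--             else:
--                 n_trans = train_trans_images_per_res if do_transition else 0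
--                 n_fixed = train_total_n_images - (cur_image_count + n_trans)
--
--         train_n_images[res] = {
--             'trans': n_trans,
--             'fixed': n_fixed,
--             # 'total': n_trans + n_fixed
--         }
--
--         # update
--         cur_image_count = cur_image_count + train_n_images[res]['trans'] + train_n_images[res]['fixed']
--
--     double_check = [v['trans'] + v['fixed'] for k, v in train_n_images.items()]
--     assert sum(double_check) == train_total_n_images
--     return train_n_images
-- ===== SOURCE B (Python) =====
-- def compute_training_image_counts(train_start_res, resolutions, do_transition_res,
--                                   train_trans_images_per_res, train_fixed_images_per_res, train_total_n_images):
--     # Stateless two-phase version: compute the prefix image count before the final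
--     # resolution once, then build every per-resolution entry independently.
--     last_res = resolutions[-1] if resolutions else None
--
--     def contrib(res, do_transition):
--         if res < train_start_res:
--             return 0
--         return (train_trans_images_per_res if do_transition else 0) + train_fixed_images_per_res
--
--     prefix = 0
--     for res, do_transition in do_transition_res.items():
--         if res == last_res:
--             break
--         prefix += contrib(res, do_transition)
--
--     def entry(res, do_transition):
--         if res < train_start_res:
--             return {'trans': 0, 'fixed': 0}
--         n_trans = train_trans_images_per_res if do_transition else 0
--         if res != last_res:
--             n_fixed = train_fixed_images_per_res
--         else:
--             n_fixed = train_total_n_images - (prefix + n_trans)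
--         return {'trans': n_trans, 'fixed': n_fixed}
--
--     train_n_images = {res: entry(res, do_transition) for res, do_transition in do_transition_res.items()}
--     assert sum(v['trans'] + v['fixed'] for v in train_n_images.values()) == train_total_n_images
--     return train_n_images
-- ===== Notes on version B (the rewrite author's own statement) =====
-- stated objective: alternative
-- what changed: Replaces A's single stateful loop that threads a running cumulative image count through every entry with a stateless two-phase decomposition: one prefix-sum pass up to the final resolution, then every per-resolution entry is built independently by a pure function.
import Mathlib
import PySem

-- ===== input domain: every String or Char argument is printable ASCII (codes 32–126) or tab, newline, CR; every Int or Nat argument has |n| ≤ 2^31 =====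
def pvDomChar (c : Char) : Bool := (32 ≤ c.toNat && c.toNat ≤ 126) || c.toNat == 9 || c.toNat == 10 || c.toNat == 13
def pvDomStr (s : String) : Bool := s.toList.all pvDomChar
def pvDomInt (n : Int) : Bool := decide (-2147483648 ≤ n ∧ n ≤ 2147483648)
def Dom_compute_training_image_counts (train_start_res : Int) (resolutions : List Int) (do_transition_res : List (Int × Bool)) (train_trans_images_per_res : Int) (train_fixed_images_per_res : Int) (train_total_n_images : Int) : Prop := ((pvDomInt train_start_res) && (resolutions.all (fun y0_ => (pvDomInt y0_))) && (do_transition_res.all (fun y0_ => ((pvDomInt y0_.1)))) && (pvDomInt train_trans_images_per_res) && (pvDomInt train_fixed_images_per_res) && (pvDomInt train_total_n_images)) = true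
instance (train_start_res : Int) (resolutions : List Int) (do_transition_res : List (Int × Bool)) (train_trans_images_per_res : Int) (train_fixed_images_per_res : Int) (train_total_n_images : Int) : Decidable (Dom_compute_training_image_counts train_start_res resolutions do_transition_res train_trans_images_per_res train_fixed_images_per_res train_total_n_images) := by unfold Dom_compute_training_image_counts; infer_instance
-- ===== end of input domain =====

-- B replaces A's single stateful loop (a running image count threaded through every
-- entry) by a stateless two-phase decomposition: one prefix sum up to the final
-- resolution, then each entry built independently (objective: alternative).
-- The dict argument/result follow the assoc-list convention; both ports iterate the
-- dict's items (first-key order, last value on duplicate keys).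

-- ===== PORT A =====
-- A-side helper: the body of A's single for-loop (state = (cur_image_count, train_n_images)).
def pvStepA (train_start_res : Int) (lastRes : Option Int) (t f total : Int)
    (st : Int × PySem.Dict Int (List (String × Int))) (p : Int × Bool) :
    Int × PySem.Dict Int (List (String × Int)) :=
  let nt_nf : Int × Int :=
    if p.1 < train_start_res then (0, 0)
    else if some p.1 ≠ lastRes then ((if p.2 then t else 0), f)
    else ((if p.2 then t else 0), total - (st.1 + (if p.2 then t else 0)))
  (st.1 + nt_nf.1 + nt_nf.2, st.2.insert p.1 [("trans", nt_nf.1), ("fixed", nt_nf.2)])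

def compute_training_image_counts (train_start_res : Int) (resolutions : List Int) (do_transition_res : List (Int × Bool)) (train_trans_images_per_res : Int) (train_fixed_images_per_res : Int) (train_total_n_images : Int) : List (Int × List (String × Int)) :=
  -- resolutions[-1]; none = IndexError, excluded by Pre_ (A only reads it for res ≥ train_start_res)
  let lastRes := PySem.List.pyGet? resolutions (-1)
  (((PySem.Dict.ofList do_transition_res).items).foldl
      (pvStepA train_start_res lastRes train_trans_images_per_res train_fixed_images_per_res train_total_n_images)
      (0, PySem.Dict.empty)).2.items

-- ===== PORT B =====
-- B-side helpers: contrib, the prefix loop (with break at the final resolution) and entry.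
def pvContrib (train_start_res t f : Int) (p : Int × Bool) : Int :=
  if p.1 < train_start_res then 0 else (if p.2 then t else 0) + f

def pvPrefix (train_start_res : Int) (lastRes : Option Int) (t f : Int) : List (Int × Bool) → Int
  | [] => 0
  | p :: rest =>
      if some p.1 = lastRes then 0
      else pvContrib train_start_res t f p + pvPrefix train_start_res lastRes t f rest

def pvEntry (train_start_res : Int) (lastRes : Option Int) (t f total pr : Int) (p : Int × Bool) :
    Int × List (String × Int) :=
  if p.1 < train_start_res then (p.1, [("trans", (0 : Int)), ("fixed", (0 : Int))])
  else
    let nt : Int := if p.2 then t else 0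
    if some p.1 ≠ lastRes then (p.1, [("trans", nt), ("fixed", f)])
    else (p.1, [("trans", nt), ("fixed", total - (pr + nt))])

def compute_training_image_counts_alt (train_start_res : Int) (resolutions : List Int) (do_transition_res : List (Int × Bool)) (train_trans_images_per_res : Int) (train_fixed_images_per_res : Int) (train_total_n_images : Int) : List (Int × List (String × Int)) :=
  let its := (PySem.Dict.ofList do_transition_res).items
  let lastRes := PySem.List.pyGet? resolutions (-1)   -- resolutions[-1] if resolutions else None
  let pr := pvPrefix train_start_res lastRes train_trans_images_per_res train_fixed_images_per_res its
  its.map (pvEntry train_start_res lastRes train_trans_images_per_res train_fixed_images_per_res train_total_n_images pr)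

-- ===== PRECONDITION & SPEC =====
-- Pre_ = exactly the inputs where Python A returns: no IndexError (resolutions empty while
-- some res ≥ train_start_res) and the final 'assert sum(...) == train_total_n_images' passes,
-- expressed closed-form: if the last resolution occurs as a key with res ≥ start, the entries
-- after it must contribute 0; otherwise the plain per-entry contributions must sum to the total.
def Pre_compute_training_image_counts (train_start_res : Int) (resolutions : List Int) (do_transition_res : List (Int × Bool)) (train_trans_images_per_res : Int) (train_fixed_images_per_res : Int) (train_total_n_images : Int) : Prop :=
  (resolutions = [] → ∀ p ∈ (PySem.Dict.ofList do_transition_res).items, p.1 < train_start_res) ∧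
  (if ∃ p ∈ (PySem.Dict.ofList do_transition_res).items, some p.1 = PySem.List.pyGet? resolutions (-1) ∧ train_start_res ≤ p.1 then
     ((((PySem.Dict.ofList do_transition_res).items).dropWhile (fun p => some p.1 != PySem.List.pyGet? resolutions (-1))).tail.map (pvContrib train_start_res train_trans_images_per_res train_fixed_images_per_res)).sum = 0
   else
     (((PySem.Dict.ofList do_transition_res).items).map (pvContrib train_start_res train_trans_images_per_res train_fixed_images_per_res)).sum = train_total_n_images)
instance (train_start_res : Int) (resolutions : List Int) (do_transition_res : List (Int × Bool)) (train_trans_images_per_res : Int) (train_fixed_images_per_res : Int) (train_total_n_images : Int) : Decidable (Pre_compute_training_image_counts train_start_res resolutions do_transition_res train_trans_images_per_res train_fixed_images_per_res train_total_n_images) := by unfold Pre_compute_training_image_counts; infer_instance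

def pvWitness_compute_training_image_counts : Int × List Int × (List (Int × Bool)) × Int × Int × Int :=
  (4, [4, 8], [(4, true), (8, true)], 10, 20, 100)

def Spec_compute_training_image_counts (train_start_res : Int) (resolutions : List Int) (do_transition_res : List (Int × Bool)) (train_trans_images_per_res : Int) (train_fixed_images_per_res : Int) (train_total_n_images : Int) (out : List (Int × List (String × Int))) : Prop := out = compute_training_image_counts_alt train_start_res resolutions do_transition_res train_trans_images_per_res train_fixed_images_per_res train_total_n_images
instance (train_start_res : Int) (resolutions : List Int) (do_transition_res : List (Int × Bool)) (train_trans_images_per_res : Int) (train_fixed_images_per_res : Int) (train_total_n_images : Int) (out : List (Int × List (String × Int))) : Decidable (Spec_compute_training_image_counts train_start_res resolutions do_transition_res train_trans_images_per_res train_fixed_images_per_res train_total_n_images out) := by unfold Spec_compute_training_image_counts; infer_instance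

-- ===== CLAIM (what is proved, stated in full; the proofs are below) =====
def Claim_equal_compute_training_image_counts : Prop := ∀ (train_start_res : Int) (resolutions : List Int) (do_transition_res : List (Int × Bool)) (train_trans_images_per_res : Int) (train_fixed_images_per_res : Int) (train_total_n_images : Int), Dom_compute_training_image_counts train_start_res resolutions do_transition_res train_trans_images_per_res train_fixed_images_per_res train_total_n_images → Pre_compute_training_image_counts train_start_res resolutions do_transition_res train_trans_images_per_res train_fixed_images_per_res train_total_n_images → Spec_compute_training_image_counts train_start_res resolutions do_transition_res train_trans_images_per_res train_fixed_images_per_res train_total_n_images (compute_training_image_counts train_start_res resolutions do_transition_res train_trans_images_per_res train_fixed_images_per_res train_total_n_images)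

-- ===== LEMMAS AND PROOFS =====

-- entries that are not the final resolution do not depend on the prefix
lemma pvEntry_congr (s : Int) (L : Option Int) (t f total pr pr' : Int) (p : Int × Bool)
    (h : some p.1 ≠ L) :
    pvEntry s L t f total pr p = pvEntry s L t f total pr' p := by
  simp [pvEntry, h]

lemma map_pvEntry_congr (s : Int) (L : Option Int) (t f total pr pr' : Int)
    (its : List (Int × Bool)) (h : ∀ p ∈ its, some p.1 ≠ L) :
    its.map (pvEntry s L t f total pr) = its.map (pvEntry s L t f total pr') := by
  apply List.map_congr_left
  intro p hp
  exact pvEntry_congr s L t f total pr pr' p (h p hp)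

-- the loop invariant: A's fold over fresh, distinct keys appends exactly B's entries,
-- with the running count entering only through the final resolution's 'fixed' value
lemma pvLoop_items (s : Int) (L : Option Int) (t f total : Int) :
    ∀ (its : List (Int × Bool)) (cur : Int) (d : PySem.Dict Int (List (String × Int))),
      (∀ p ∈ its, d.contains p.1 = false) → (its.map (·.1)).Nodup →
      (its.foldl (pvStepA s L t f total) (cur, d)).2.items
        = d.items ++ its.map (pvEntry s L t f total (cur + pvPrefix s L t f its)) := by
  intro its
  induction its with
  | nil => intro cur d _ _; simp
  | cons p rest ih =>
    intro cur d hfresh hnd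
    have hpd : d.contains p.1 = false := hfresh p (by simp)
    have hnd' : (rest.map (·.1)).Nodup := by simpa using hnd.of_cons
    have hne : ∀ q ∈ rest, q.1 ≠ p.1 := by
      intro q hq
      have hnd2 := hnd
      rw [List.map_cons] at hnd2
      have := (List.nodup_cons.mp hnd2).1
      intro h; exact this (h ▸ List.mem_map_of_mem hq)
    have hfresh' : ∀ v, ∀ q ∈ rest, (d.insert p.1 v).contains q.1 = false := by
      intro v q hq
      rw [PySem.Dict.contains_insert]
      simp [hfresh q (List.mem_cons_of_mem _ hq), hne q hq]
    by_cases hL : some p.1 = L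
    · -- head is the final resolution: prefix stops here; no later entry is the final one
      have hrest : ∀ q ∈ rest, some q.1 ≠ L := by
        intro q hq h; exact hne q hq (by injection (h.trans hL.symm))
      by_cases hlt : p.1 < s
      · rw [List.foldl_cons]
        have hstep : pvStepA s L t f total (cur, d) p
            = (cur, d.insert p.1 [("trans", 0), ("fixed", 0)]) := by
          simp [pvStepA, hlt]
        rw [hstep, ih cur _ (hfresh' _) hnd',
            PySem.Dict.items_insert_of_not_contains _ _ hpd]
        simp only [List.map_cons, List.append_assoc, List.cons_append, List.nil_append]
        rw [map_pvEntry_congr s L t f total (cur + pvPrefix s L t f rest)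
              (cur + pvPrefix s L t f (p :: rest)) rest hrest]
        simp [pvEntry, hlt, pvPrefix, hL]
      · rw [List.foldl_cons]
        have hstep : pvStepA s L t f total (cur, d) p
            = (total, d.insert p.1 [("trans", (if p.2 then t else 0)),
                ("fixed", total - (cur + (if p.2 then t else 0)))]) := by
          simp [pvStepA, hlt, hL]
          try ring
        rw [hstep, ih total _ (hfresh' _) hnd',
            PySem.Dict.items_insert_of_not_contains _ _ hpd]
        simp only [List.map_cons, List.append_assoc, List.cons_append, List.nil_append]
        rw [map_pvEntry_congr s L t f total (total + pvPrefix s L t f rest)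
              (cur + pvPrefix s L t f (p :: rest)) rest hrest]
        simp only [pvPrefix, hL]
        simp [pvEntry, hlt, hL]
    · -- head is not the final resolution: its contribution moves into the prefix
      rw [List.foldl_cons]
      by_cases hlt : p.1 < s
      · have hstep : pvStepA s L t f total (cur, d) p
            = (cur, d.insert p.1 [("trans", 0), ("fixed", 0)]) := by
          simp [pvStepA, hlt]
        rw [hstep, ih cur _ (hfresh' _) hnd',
            PySem.Dict.items_insert_of_not_contains _ _ hpd]
        simp only [List.map_cons, List.append_assoc, List.cons_append, List.nil_append]
        have : cur + pvPrefix s L t f (p :: rest) = cur + pvPrefix s L t f rest := by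
          simp [pvPrefix, hL, pvContrib, hlt]
        rw [this]
        simp [pvEntry, hlt]
      · have hstep : pvStepA s L t f total (cur, d) p
            = (cur + (if p.2 then t else 0) + f,
               d.insert p.1 [("trans", (if p.2 then t else 0)), ("fixed", f)]) := by
          simp [pvStepA, hlt, hL]
        rw [hstep, ih _ _ (hfresh' _) hnd',
            PySem.Dict.items_insert_of_not_contains _ _ hpd]
        simp only [List.map_cons, List.append_assoc, List.cons_append, List.nil_append]
        have : cur + (if p.2 then t else 0) + f + pvPrefix s L t f rest
            = cur + pvPrefix s L t f (p :: rest) := by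
          simp [pvPrefix, hL, pvContrib, hlt]
          ring
        rw [this]
        simp [pvEntry, hlt, hL]

-- ===== VERDICT (by name: the statement is the Claim_ definition above) =====
theorem compute_training_image_counts_spec : Claim_equal_compute_training_image_counts := by
  intro s res dtr t f total _ _
  unfold Spec_compute_training_image_counts
  unfold compute_training_image_counts compute_training_image_counts_alt
  have hnd : (((PySem.Dict.ofList dtr).items).map (·.1)).Nodup := by
    have := PySem.Dict.nodup_keys_ofList (κ := Int) (ν := Bool) dtr
    simpa [PySem.Dict.keys] using this
  rw [pvLoop_items s (PySem.List.pyGet? res (-1)) t f total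
        ((PySem.Dict.ofList dtr).items) 0 PySem.Dict.empty
        (by intro p _; simp) hnd]
  simp [PySem.Dict.empty]
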